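-- pv_equiv track=rewrite | github.com/Gueni/TESTMODEL | plecs_mapping.py | tofile_map_gen
-- ===== SOURCE A (Python) =====
-- import collections
-- import copy
--
-- def tofile_map_gen(mapping_Raw, lengths):
-- 	"""
--     Generates two ordered dictionaries of mappings from a raw mapping list and segment lengths.
--
--     Processes raw mapping data into structured ordered dictionaries with different indexing schemes.
--     The 3D mapping uses zero-based indexing while the multiple mapping uses continuous indexing.
--
--     Args:
--         mapping_Raw (list): Raw mapping data as a list of elements to be partitioned
--         lengths (list): List of integers representing lengths for each segment partition
--                         The sum of lengths must be <= length of mapping_Raw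
--
--     Returns:
--         tuple: Contains two ordered dictionaries:
--             - Tofile_mapping_3D: OrderedDict with zero-based indexing for each segment
--             - Tofile_mapping_multiple: OrderedDict with continuous indexing across segments
-- 	"""
-- 	# c: segment counter, idx_shift: starting index for multiple mapping
-- 	c, idx_shift 			= 0, 1
--
-- 	# Names for each mapping segment
-- 	Maps_names 				= ["Peak_Currents", "Peak_Voltages", "Dissipations", "Elec_Stats", "Temps", "Thermal_Stats", "Controls"]
--
-- 	# Initialize ordered dictionaries for mappings
-- 	Tofile_mapping_3D 		= collections.OrderedDict()
-- 	Tofile_mapping_multiple = collections.OrderedDict()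
--
-- 	for i in range(1, len(lengths)):
-- 		# Extract segment from raw mapping data
-- 		segment 									= copy.deepcopy(mapping_Raw[c + 1:lengths[i] + c + 1])
--
--         # Create mapping with zero-based indexing for 3D dictionary
-- 		Tofile_mapping_3D[Maps_names[i - 1]] 		= collections.OrderedDict(zip(segment, range(0, len(segment))))
--
--         # Create mapping with continuous indexing for multiple dictionary
-- 		Tofile_mapping_multiple[Maps_names[i - 1]] 	= collections.OrderedDict(zip(segment, range(idx_shift, len(segment) + idx_shift)))
--
-- 		# Update counters for next segment
-- 		c 			+= lengths[i]
-- 		idx_shift	+= lengths[i]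
--
-- 	return Tofile_mapping_3D, Tofile_mapping_multiple
-- ===== SOURCE B (Python) =====
-- import collections
-- import copy
--
-- def tofile_map_gen(mapping_Raw, lengths):
-- 	"""Different decomposition: a recursive pass first materialises the list of
-- 	(name, segment, start) triples; both OrderedDicts are then built from that
-- 	list in two separate comprehension passes instead of being grown inside the loop."""
-- 	Maps_names = ["Peak_Currents", "Peak_Voltages", "Dissipations", "Elec_Stats", "Temps", "Thermal_Stats", "Controls"]
--
-- 	def segments(i, start):
-- 		if i >= len(lengths):
-- 			return []
-- 		seg = copy.deepcopy(mapping_Raw[start:lengths[i] + start])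
-- 		return [(Maps_names[i - 1], seg, start)] + segments(i + 1, start + lengths[i])
--
-- 	triples = segments(1, 1)
-- 	Tofile_mapping_3D = collections.OrderedDict(
-- 		(name, collections.OrderedDict((k, j) for j, k in enumerate(seg)))
-- 		for name, seg, _ in triples)
-- 	Tofile_mapping_multiple = collections.OrderedDict(
-- 		(name, collections.OrderedDict((k, j + start) for j, k in enumerate(seg)))
-- 		for name, seg, start in triples)
-- 	return Tofile_mapping_3D, Tofile_mapping_multiple
-- ===== Notes on version B (the rewrite author's own statement) =====
-- stated objective: alternative
-- what changed: B replaces A's single mutating loop (two running counters, four pieces of state, both dicts grown per iteration) with a staged pipeline: a recursive pass first materialises the list of (name, segment, start) triples, then the two OrderedDicts are each built afterwards in one shot by a comprehension over that list.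
import Mathlib
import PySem

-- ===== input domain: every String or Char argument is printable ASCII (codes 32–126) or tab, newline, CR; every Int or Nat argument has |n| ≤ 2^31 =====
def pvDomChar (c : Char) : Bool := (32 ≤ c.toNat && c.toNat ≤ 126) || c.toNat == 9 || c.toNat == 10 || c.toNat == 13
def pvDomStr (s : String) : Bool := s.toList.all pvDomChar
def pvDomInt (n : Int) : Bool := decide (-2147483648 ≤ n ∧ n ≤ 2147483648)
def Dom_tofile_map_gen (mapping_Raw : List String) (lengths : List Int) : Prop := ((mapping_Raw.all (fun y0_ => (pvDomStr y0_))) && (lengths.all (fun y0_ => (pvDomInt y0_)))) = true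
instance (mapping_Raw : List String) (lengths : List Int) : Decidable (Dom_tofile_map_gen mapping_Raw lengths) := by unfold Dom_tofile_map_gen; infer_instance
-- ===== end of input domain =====

-- B (alternative decomposition): a recursive pass first materialises the list of
-- (name, segment, start) triples; the two OrderedDicts are then built from that list
-- in two separate staged passes instead of being grown inside the loop.

-- ===== PORT A =====
-- Maps_names, the same literal in A and in B
def pvMapsNames : List String :=
  ["Peak_Currents", "Peak_Voltages", "Dissipations", "Elec_Stats", "Temps", "Thermal_Stats", "Controls"]

-- one iteration of A's for-loop; state = (c, idx_shift, Tofile_mapping_3D, Tofile_mapping_multiple)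
-- (inner OrderedDicts are stored as their items lists, per the dict → assoc-list convention)
def pvStepA (mapping_Raw : List String) (lengths : List Int)
    (st : Int × Int × PySem.Dict String (List (String × Int)) × PySem.Dict String (List (String × Int)))
    (i : Int) :
    Int × Int × PySem.Dict String (List (String × Int)) × PySem.Dict String (List (String × Int)) :=
  let c := st.1
  let idx_shift := st.2.1
  let li := PySem.List.pyGetD lengths i 0        -- lengths[i]; i always in range inside the loop
  let segment := PySem.List.slice mapping_Raw (some (c + 1)) (some (li + c + 1))
  let name := PySem.List.pyGetD pvMapsNames (i - 1) ""   -- Maps_names[i-1]; IndexError only outside Pre_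
  let n := PySem.List.len segment
  let e3 := (segment.zip (PySem.List.pyRange 0 n 1)).foldl
      (fun d p => d.insert p.1 p.2) (PySem.Dict.empty : PySem.Dict String Int)
  let em := (segment.zip (PySem.List.pyRange idx_shift (n + idx_shift) 1)).foldl
      (fun d p => d.insert p.1 p.2) (PySem.Dict.empty : PySem.Dict String Int)
  (c + li, idx_shift + li, st.2.2.1.insert name e3.items, st.2.2.2.insert name em.items)

def tofile_map_gen (mapping_Raw : List String) (lengths : List Int) :
    (List (String × List (String × Int))) × (List (String × List (String × Int))) :=
  let st := (PySem.List.pyRange 1 (PySem.List.len lengths) 1).foldl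
      (pvStepA mapping_Raw lengths)
      (0, 1, (PySem.Dict.empty : PySem.Dict String (List (String × Int))),
             (PySem.Dict.empty : PySem.Dict String (List (String × Int))))
  (st.2.2.1.items, st.2.2.2.items)

-- ===== PORT B =====
-- recursive helper `segments(i, start)` of B; fuel only makes the recursion structural,
-- the Python recursion stops on the same `i >= len(lengths)` test
def pvSegments (mapping_Raw : List String) (lengths : List Int) :
    Nat → Int → Int → List (String × List String × Int)
  | 0, _, _ => []
  | fuel + 1, i, start =>
    if i ≥ PySem.List.len lengths then []
    else
      let seg := PySem.List.slice mapping_Raw (some start) (some (PySem.List.pyGetD lengths i 0 + start))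
      (PySem.List.pyGetD pvMapsNames (i - 1) "", seg, start) ::
        pvSegments mapping_Raw lengths fuel (i + 1) (start + PySem.List.pyGetD lengths i 0)

-- inner OrderedDict((k, j) for j, k in enumerate(seg)), values shifted by off
def pvInner (seg : List String) (off : Int) : List (String × Int) :=
  ((PySem.List.enumerate seg 0).foldl
      (fun d p => d.insert p.2 (p.1 + off)) (PySem.Dict.empty : PySem.Dict String Int)).items

def tofile_map_gen_alt (mapping_Raw : List String) (lengths : List Int) :
    (List (String × List (String × Int))) × (List (String × List (String × Int))) :=
  let triples := pvSegments mapping_Raw lengths lengths.length 1 1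
  let three := triples.foldl
      (fun d t => d.insert t.1 (pvInner t.2.1 0))
      (PySem.Dict.empty : PySem.Dict String (List (String × Int)))
  let mult := triples.foldl
      (fun d t => d.insert t.1 (pvInner t.2.1 t.2.2))
      (PySem.Dict.empty : PySem.Dict String (List (String × Int)))
  (three.items, mult.items)

-- ===== PRECONDITION & SPEC =====
-- A indexes the 7-element Maps_names with i-1 for i in range(1, len(lengths)): with 9 or more
-- lengths it raises IndexError (so does B); Pre_ excludes exactly those inputs.
def Pre_tofile_map_gen (_mapping_Raw : List String) (lengths : List Int) : Prop :=
  lengths.length ≤ 8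
instance (mapping_Raw : List String) (lengths : List Int) : Decidable (Pre_tofile_map_gen mapping_Raw lengths) := by unfold Pre_tofile_map_gen; infer_instance

def pvWitness_tofile_map_gen : List String × List Int := (["a", "b", "c"], [0, 2, 1])

def Spec_tofile_map_gen (mapping_Raw : List String) (lengths : List Int) (out : (List (String × List (String × Int))) × (List (String × List (String × Int)))) : Prop := out = tofile_map_gen_alt mapping_Raw lengths
instance (mapping_Raw : List String) (lengths : List Int) (out : (List (String × List (String × Int))) × (List (String × List (String × Int)))) : Decidable (Spec_tofile_map_gen mapping_Raw lengths out) := by unfold Spec_tofile_map_gen; infer_instance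

-- ===== CLAIM (what is proved, stated in full; the proofs are below) =====
def Claim_equal_tofile_map_gen : Prop := ∀ (mapping_Raw : List String) (lengths : List Int), Dom_tofile_map_gen mapping_Raw lengths → Pre_tofile_map_gen mapping_Raw lengths → Spec_tofile_map_gen mapping_Raw lengths (tofile_map_gen mapping_Raw lengths)

-- ===== LEMMAS AND PROOFS =====

theorem pvEnum_shift {α : Type} (xs : List α) (s t : Int) :
    PySem.List.enumerate xs (t + s) = (PySem.List.enumerate xs t).map (fun p => (p.1 + s, p.2)) := by
  induction xs generalizing t with
  | nil => rfl
  | cons x xs ih =>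
      rw [PySem.List.enumerate_cons, PySem.List.enumerate_cons, List.map_cons]
      rw [show t + s + 1 = (t + 1) + s by ring, ih]

theorem pvZip_enum (xs : List String) (s : Int) :
    xs.zip (PySem.List.pyRange s (s + xs.length) 1) =
      (PySem.List.enumerate xs s).map (fun p => (p.2, p.1)) := by
  induction xs generalizing s with
  | nil => simp [PySem.List.pyRange_one_eq_nil]
  | cons x xs ih =>
      rw [PySem.List.pyRange_one_cons (by push_cast [List.length_cons]; omega), List.zip_cons_cons,
          PySem.List.enumerate_cons, List.map_cons]
      rw [show s + ((x :: xs).length : Int) = (s + 1) + xs.length by push_cast [List.length_cons]; ring]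
      rw [ih]

-- A's zip-built inner dict is B's shifted enumerate-built inner dict
theorem pvInner_eq (seg : List String) (s : Int) :
    ((seg.zip (PySem.List.pyRange s (PySem.List.len seg + s) 1)).foldl
        (fun d p => d.insert p.1 p.2) (PySem.Dict.empty : PySem.Dict String Int)).items =
      pvInner seg s := by
  have h : PySem.List.len seg + s = s + (seg.length : Int) := by
    simp [PySem.List.len_eq]; ring
  rw [h, pvZip_enum, List.foldl_map]
  have h2 : PySem.List.enumerate seg s = (PySem.List.enumerate seg 0).map (fun p => (p.1 + s, p.2)) := by
    simpa using pvEnum_shift seg s 0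
  rw [h2, List.foldl_map]
  rfl

-- the loop of A, run from state (c, c+1, x, y) over range(i, n), deposits exactly the
-- triples B's segments(i, c+1) produces, folded into x and y
theorem pvLoop_eq (mr : List String) (len : List Int) :
    ∀ (fuel : Nat) (i c : Int) (x y : PySem.Dict String (List (String × Int))),
      PySem.List.len len - i ≤ fuel →
      ∃ c',
        (PySem.List.pyRange i (PySem.List.len len) 1).foldl (pvStepA mr len) (c, c + 1, x, y) =
          (c', c' + 1,
            (pvSegments mr len fuel i (c + 1)).foldl
              (fun d t => d.insert t.1 (pvInner t.2.1 0)) x,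
            (pvSegments mr len fuel i (c + 1)).foldl
              (fun d t => d.insert t.1 (pvInner t.2.1 t.2.2)) y) := by
  intro fuel
  induction fuel with
  | zero =>
      intro i c x y h
      rw [PySem.List.pyRange_one_eq_nil (by omega)]
      exact ⟨c, rfl⟩
  | succ fuel ih =>
      intro i c x y h
      by_cases hi : i < PySem.List.len len
      · rw [PySem.List.pyRange_one_cons hi, List.foldl_cons,
            pvSegments, if_neg (by omega)]
        simp only [List.foldl_cons]
        have hstep : pvStepA mr len (c, c + 1, x, y) i =
            (c + PySem.List.pyGetD len i 0, (c + PySem.List.pyGetD len i 0) + 1,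
             x.insert (PySem.List.pyGetD pvMapsNames (i - 1) "")
               (pvInner (PySem.List.slice mr (some (c + 1)) (some (PySem.List.pyGetD len i 0 + (c + 1)))) 0),
             y.insert (PySem.List.pyGetD pvMapsNames (i - 1) "")
               (pvInner (PySem.List.slice mr (some (c + 1)) (some (PySem.List.pyGetD len i 0 + (c + 1)))) (c + 1))) := by
          unfold pvStepA
          simp only []
          have hb : PySem.List.pyGetD len i 0 + c + 1 = PySem.List.pyGetD len i 0 + (c + 1) := by ring
          rw [hb]
          set seg := PySem.List.slice mr (some (c + 1)) (some (PySem.List.pyGetD len i 0 + (c + 1))) with hseg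
          have h0 : ((seg.zip (PySem.List.pyRange 0 (PySem.List.len seg) 1)).foldl
              (fun d p => d.insert p.1 p.2) (PySem.Dict.empty : PySem.Dict String Int)).items =
                pvInner seg 0 := by
            have := pvInner_eq seg 0
            simpa using this
          have h1 := pvInner_eq seg (c + 1)
          refine Prod.ext rfl (Prod.ext (by ring) ?_)
          exact Prod.ext (by rw [h0]) (by rw [h1])
        rw [hstep]
        obtain ⟨c', hc'⟩ := ih (i + 1) (c + PySem.List.pyGetD len i 0) _ _ (by omega)
        refine ⟨c', ?_⟩
        rw [hc']
        have : c + PySem.List.pyGetD len i 0 + 1 = (c + 1) + PySem.List.pyGetD len i 0 := by ring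
        rw [this]
      · rw [PySem.List.pyRange_one_eq_nil (by omega), pvSegments, if_pos (by omega)]
        exact ⟨c, rfl⟩

-- ===== VERDICT (by name: the statement is the Claim_ definition above) =====
theorem tofile_map_gen_spec : Claim_equal_tofile_map_gen := by
  intro mapping_Raw lengths _ _
  show tofile_map_gen mapping_Raw lengths = tofile_map_gen_alt mapping_Raw lengths
  unfold tofile_map_gen tofile_map_gen_alt
  obtain ⟨c', hc'⟩ := pvLoop_eq mapping_Raw lengths lengths.length 1 0
      PySem.Dict.empty PySem.Dict.empty (by simp [PySem.List.len_eq])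
  rw [show ((0 : Int) + 1) = (1 : Int) from rfl] at hc'
  simp only [hc']
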